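-- pv_equiv track=rewrite | github.com/AllenInstitute/MicronsBinder | notebooks/multiscale/motifs/utils/motif_counts.py | match_edges
-- ===== SOURCE A (Python) =====
-- def reflect(edges, identity):
--     """Reflect triplet edges across axis of reflection_vertex, return new set of edges
--
--     Args:
--         edges: Triplet.edges
--         identity: int in [0,1,2] for vertex on axis of reflection
--     """
--     reflect = [x for x in range(3) if x != identity]
--     remap = {identity: identity, reflect[0]: reflect[1], reflect[1]: reflect[0]} # old_id: new_id
--     return set([(remap[u], remap[v]) for u, v in edges])
--
-- def match_edges(A, B, reflections=range(3)):
--     """Are these two edge lists the same motif? (equivalent under any reflection symmetry)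
--     Explores tree of reflections with recursion, e.g. A.reflect(0).reflect(1).reflect(2), etc
--
--     Args:
--         A: Triplet.edges
--         B: Triplet.edges
--     """
--     if A == B:
--         return True
--     if len(reflections) > 1:
--         for k in reflections:
--             if match_edges(reflect(A, k), B, reflections=[r for r in reflections if r != k]):
--                 return True
--     return False
-- ===== SOURCE B (Python) =====
-- def reflect(edges, identity):
--     refl = [x for x in range(3) if x != identity]
--     remap = {identity: identity, refl[0]: refl[1], refl[1]: refl[0]}
--     return set((remap[u], remap[v]) for u, v in edges)
--
-- def match_edges(A, B, reflections=range(3)):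
--     """Iterative worklist (explicit stack) instead of recursion: pop a state
--     (edges, rem); a match returns True; when len(rem) > 1 push the reflected
--     children.  Visits the same depth-limited tree of reflected edge sets."""
--     stack = [(A, list(reflections))]
--     while stack:
--         edges, rem = stack.pop()
--         if edges == B:
--             return True
--         if len(rem) > 1:
--             for k in rem:
--                 stack.append((reflect(edges, k), [r for r in rem if r != k]))
--     return False
-- ===== Notes on version B (the rewrite author's own statement) =====
-- stated objective: alternative
-- what changed: A explores the depth-limited tree of reflected edge sets by recursion with a per-level for-loop; B replaces the recursion by an explicit iterative worklist (LIFO stack) that pops a state, tests it against B, and pushes its reflected children, visiting the same states without any recursion.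
-- outside the precondition, e.g. on match_edges({(0, 1)}, {(9, 9)}, [5, 7]): A returns False, B returns False
import Mathlib
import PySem

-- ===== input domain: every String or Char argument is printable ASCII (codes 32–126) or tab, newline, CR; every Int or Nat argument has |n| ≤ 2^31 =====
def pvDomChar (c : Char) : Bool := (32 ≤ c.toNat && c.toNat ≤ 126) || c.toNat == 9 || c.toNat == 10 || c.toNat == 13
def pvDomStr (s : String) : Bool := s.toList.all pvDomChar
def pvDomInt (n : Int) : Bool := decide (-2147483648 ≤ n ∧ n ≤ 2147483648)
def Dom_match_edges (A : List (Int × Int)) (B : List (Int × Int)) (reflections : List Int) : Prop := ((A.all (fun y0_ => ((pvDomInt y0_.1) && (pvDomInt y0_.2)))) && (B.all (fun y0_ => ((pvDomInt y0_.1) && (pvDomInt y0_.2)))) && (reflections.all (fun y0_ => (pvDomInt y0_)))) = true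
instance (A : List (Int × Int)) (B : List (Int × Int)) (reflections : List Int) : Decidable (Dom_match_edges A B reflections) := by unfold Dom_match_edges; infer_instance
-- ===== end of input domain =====

-- B replaces A's recursive exploration of the reflection tree by an explicit iterative
-- worklist (LIFO stack) over the same depth-limited tree of reflected edge sets.

-- ===== PORT A =====

-- remap each edge endpoint through the dict; a missing key is Python's KeyError (none)
def pvRemapEdges (remap : PySem.Dict Int Int) : List (Int × Int) → Option (List (Int × Int))
  | [] => some []
  | (u, v) :: rest =>
    match remap.get? u, remap.get? v with
    | some u', some v' => (pvRemapEdges remap rest).map (fun t => (u', v') :: t)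
    | _, _ => none

-- reflect(edges, identity): builds [x for x in range(3) if x != identity], the remap dict,
-- and the remapped edge set; none = KeyError inside the set comprehension
def pvReflect (edges : List (Int × Int)) (identity : Int) : Option (PySem.Set (Int × Int)) :=
  let refl := (PySem.List.pyRange 0 3 1).filter (fun x => x ≠ identity)
  match refl with
  | r0 :: r1 :: _ =>
    let remap : PySem.Dict Int Int :=
      ((PySem.Dict.empty.insert identity identity).insert r0 r1).insert r1 r0
    (pvRemapEdges remap edges).map PySem.Set.ofList
  | _ => none   -- unreachable: the filtered list always has ≥ 2 elements

-- A's recursion: `if A == B` is Python set equality (Set.equal); pvLoopA is the `for k`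
-- loop; none propagates a KeyError.  fuel only makes the recursion structural: every
-- recursive call strictly shrinks reflections, so with the initial fuel
-- `reflections.length` the fuel-0 branch is reached only when len(reflections) ≤ 1,
-- where returning false is exactly what the Python returns.
mutual
def pvGoA (fuel : Nat) (S B : List (Int × Int)) (refl : List Int) : Option Bool :=
  if PySem.Set.equal S B then some true
  else
    match fuel with
    | 0 => some false
    | fuel' + 1 => if refl.length > 1 then pvLoopA fuel' S B refl refl else some false
termination_by (fuel, 0)

def pvLoopA (fuel : Nat) (S B : List (Int × Int)) (refl : List Int) : List Int → Option Bool
  | [] => some false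
  | k :: ks =>
    match pvReflect S k with
    | none => none
    | some S' =>
      match pvGoA fuel S' B (refl.filter (fun r => r ≠ k)) with
      | some true => some true
      | some false => pvLoopA fuel S B refl ks
      | none => none
termination_by ks => (fuel, ks.length + 1)
end

def match_edges (A : List (Int × Int)) (B : List (Int × Int)) (reflections : List Int) : Bool :=
  -- `.getD false` is a totality guard only: none (a KeyError) lies outside Pre_
  (pvGoA reflections.length A B reflections).getD false

-- ===== PORT B =====

-- the `for k in rem: stack.append((reflect(edges, k), [r for r in rem if r != k]))` loop:
-- the children pushed for rem, in order; none = a KeyError raised while pushing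
def pvPush (edges : List (Int × Int)) (rem : List Int) : List Int → Option (List (List (Int × Int) × List Int))
  | [] => some []
  | k :: ks =>
    match pvReflect edges k with
    | none => none
    | some S' => (pvPush edges rem ks).map (fun cs => (S', rem.filter (fun r => r ≠ k)) :: cs)

-- termination measure for the worklist: pvN n bounds the number of tree nodes under a
-- state whose reflections list has length n; pvM sums it over the stack
def pvN : Nat → Nat
  | 0 => 1
  | 1 => 1
  | n + 2 => 1 + (n + 2) * pvN (n + 1)

def pvM (stack : List (List (Int × Int) × List Int)) : Nat :=
  (stack.map (fun e => pvN e.2.length)).sum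

theorem pvN_pos (n : Nat) : 1 ≤ pvN n := by
  match n with
  | 0 => simp [pvN]
  | 1 => simp [pvN]
  | n + 2 => simp [pvN]

theorem pvN_le_succ (n : Nat) : pvN n ≤ pvN (n + 1) := by
  match n with
  | 0 => simp [pvN]
  | n + 1 =>
    show pvN (n + 1) ≤ 1 + (n + 2) * pvN (n + 1)
    nlinarith [pvN_pos (n + 1)]

theorem pvN_mono {m n : Nat} (h : m ≤ n) : pvN m ≤ pvN n := by
  induction n with
  | zero => simp [Nat.le_zero.1 h]
  | succ n ih =>
    rcases Nat.lt_or_ge m (n + 1) with h' | h'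
    · exact le_trans (ih (by omega)) (pvN_le_succ n)
    · have : m = n + 1 := by omega
      simp [this]

theorem pvM_append (a b : List (List (Int × Int) × List Int)) :
    pvM (a ++ b) = pvM a + pvM b := by simp [pvM]

theorem pvPush_M (edges : List (Int × Int)) (rem : List Int) :
    ∀ ks cs, pvPush edges rem ks = some cs → (∀ k ∈ ks, k ∈ rem) →
      pvM cs ≤ ks.length * pvN (rem.length - 1) := by
  intro ks
  induction ks with
  | nil => intro cs h _; cases h; simp [pvM]
  | cons k ks ih =>
    intro cs h hmem
    rw [pvPush] at h
    cases hS : pvReflect edges k with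
    | none => rw [hS] at h; cases h
    | some S' =>
      rw [hS] at h
      cases hrest : pvPush edges rem ks with
      | none => rw [hrest] at h; cases h
      | some cs' =>
        rw [hrest] at h
        simp only [Option.map_some] at h
        cases h
        have hfl : (rem.filter (fun r => r ≠ k)).length < rem.length :=
          List.length_filter_lt_length_iff_exists.mpr ⟨k, hmem k (by simp), by simp⟩
        have h1 : pvN (rem.filter (fun r => r ≠ k)).length ≤ pvN (rem.length - 1) :=
          pvN_mono (by omega)
        have h2 := ih cs' hrest (fun x hx => hmem x (by simp [hx]))
        have : pvM ((S', rem.filter (fun r => r ≠ k)) :: cs') =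
            pvN (rem.filter (fun r => r ≠ k)).length + pvM cs' := by simp [pvM]
        rw [this]
        simp only [List.length_cons]
        nlinarith

theorem pvPush_M_lt (edges : List (Int × Int)) (rem : List Int) (cs : List (List (Int × Int) × List Int))
    (h : pvPush edges rem rem = some cs) (h2 : rem.length > 1) : pvM cs < pvN rem.length := by
  obtain ⟨m, hm⟩ : ∃ m, rem.length = m + 2 := ⟨rem.length - 2, by omega⟩
  have := pvPush_M edges rem rem cs h (fun k hk => hk)
  rw [hm] at this ⊢
  show pvM cs < pvN (m + 2)
  have : pvM cs ≤ (m + 2) * pvN (m + 1) := by simpa using this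
  simp only [pvN]
  omega

-- the worklist loop: pop the last element; a match returns True; otherwise push the
-- children (if len(rem) > 1) and continue; none = a KeyError from reflect
def pvLoopB (B : List (Int × Int)) (stack : List (List (Int × Int) × List Int)) : Option Bool :=
  match hlast : stack.getLast? with
  | none => some false
  | some (edges, rem) =>
    if PySem.Set.equal edges B then some true
    else if h2 : rem.length > 1 then
      match hpush : pvPush edges rem rem with
      | none => none
      | some cs => pvLoopB B (stack.dropLast ++ cs)
    else pvLoopB B stack.dropLast
termination_by pvM stack
decreasing_by
  · have hsplit := List.dropLast_append_getLast? _ hlast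
    have h1 : pvM stack = pvM stack.dropLast + pvN rem.length := by
      conv_lhs => rw [← hsplit]
      rw [pvM_append]; simp [pvM]
    have := pvPush_M_lt edges rem cs hpush h2
    rw [pvM_append]; omega
  · have hsplit := List.dropLast_append_getLast? _ hlast
    have h1 : pvM stack = pvM stack.dropLast + pvN rem.length := by
      conv_lhs => rw [← hsplit]
      rw [pvM_append]; simp [pvM]
    have := pvN_pos rem.length
    omega

def match_edges_alt (A : List (Int × Int)) (B : List (Int × Int)) (reflections : List Int) : Bool :=
  -- stack = [(A, list(reflections))]; `.getD false` is a totality guard only (KeyError)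
  (pvLoopB B [(A, reflections)]).getD false

-- ===== PRECONDITION & SPEC =====
-- Pre_ excludes the inputs on which A raises KeyError (an endpoint of A, or of a deeper
-- reflected edge set, misses the remap dict built from some reflection axis).  It is a
-- little narrower than the exact raising set: e.g. A = {(0,1)}, B = {(9,9)},
-- reflections = [5,7] returns False but is excluded, because "no KeyError ever occurs
-- down the reflection tree" has no simple closed form; see claim.json cites.
def Pre_match_edges (A : List (Int × Int)) (B : List (Int × Int)) (reflections : List Int) : Prop :=
  PySem.Set.equal A B = true ∨ reflections.length ≤ 1 ∨ A = [] ∨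
    ((∀ r ∈ reflections, r = 0 ∨ r = 1 ∨ r = 2) ∧
     ∀ p ∈ A, (p.1 = 0 ∨ p.1 = 1 ∨ p.1 = 2) ∧ (p.2 = 0 ∨ p.2 = 1 ∨ p.2 = 2))

instance (A : List (Int × Int)) (B : List (Int × Int)) (reflections : List Int) :
    Decidable (Pre_match_edges A B reflections) := by unfold Pre_match_edges; infer_instance

def pvWitness_match_edges : (List (Int × Int)) × (List (Int × Int)) × List Int :=
  ([(0, 1), (1, 2)], [(1, 0)], [0, 1, 2])

def Spec_match_edges (A : List (Int × Int)) (B : List (Int × Int)) (reflections : List Int) (out : Bool) : Prop := out = match_edges_alt A B reflections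
instance (A : List (Int × Int)) (B : List (Int × Int)) (reflections : List Int) (out : Bool) : Decidable (Spec_match_edges A B reflections out) := by unfold Spec_match_edges; infer_instance

-- ===== CLAIM (what is proved, stated in full; the proofs are below) =====
def Claim_equal_match_edges : Prop := ∀ (A : List (Int × Int)) (B : List (Int × Int)) (reflections : List Int), Dom_match_edges A B reflections → Pre_match_edges A B reflections → Spec_match_edges A B reflections (match_edges A B reflections)

-- ===== LEMMAS AND PROOFS =====

-- the Boolean value computed at a tree node (proof-side reference function)
def pvTree (B S : List (Int × Int)) (refl : List Int) : Bool :=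
  PySem.Set.equal S B ||
    (if refl.length > 1 then
      refl.attach.any (fun k => pvTree B ((pvReflect S k.1).getD []) (refl.filter (fun r => r ≠ k.1)))
    else false)
termination_by refl.length
decreasing_by
  rw [List.unattach_filter (g := fun r => decide (r ≠ k.1))
        (hf := by intro x h; simp [Subtype.ext_iff]),
      List.unattach_attach]
  apply List.length_filter_lt_length_iff_exists.mpr
  exact ⟨k.1, k.2, by simp⟩

theorem pvTree_eq (B S : List (Int × Int)) (refl : List Int) :
    pvTree B S refl = (PySem.Set.equal S B ||
      (if refl.length > 1 then
        refl.any (fun k => pvTree B ((pvReflect S k).getD []) (refl.filter (fun r => r ≠ k)))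
      else false)) := by
  rw [pvTree]
  congr 1
  split
  · rw [List.any_eq, List.any_eq, decide_eq_decide]
    constructor
    · rintro ⟨⟨k, hk⟩, _, hp⟩; exact ⟨k, hk, hp⟩
    · rintro ⟨k, hk, hp⟩; exact ⟨⟨k, hk⟩, List.mem_attach _ _, hp⟩
  · rfl

def pvOk (n : Int) : Prop := n = 0 ∨ n = 1 ∨ n = 2
def pvOkE (S : List (Int × Int)) : Prop := ∀ p ∈ S, pvOk p.1 ∧ pvOk p.2
def pvOkR (refl : List Int) : Prop := ∀ r ∈ refl, pvOk r

theorem pvReflect_nil (k : Int) : pvReflect [] k = some [] := by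
  unfold pvReflect
  by_cases h0 : k = 0
  · subst h0; decide
  · by_cases h1 : k = 1
    · subst h1; decide
    · by_cases h2 : k = 2
      · subst h2; decide
      · have : (PySem.List.pyRange 0 3 1).filter (fun x => x ≠ k) = [0, 1, 2] := by
          have : PySem.List.pyRange 0 3 1 = [0, 1, 2] := by decide
          rw [this, List.filter_eq_self.2]
          intro a ha
          fin_cases ha <;> simp <;> omega
        rw [this]
        rfl

theorem pvReflect_good (S : List (Int × Int)) (k : Int) (hk : pvOk k) (hS : pvOkE S) :
    ∃ S', pvReflect S k = some S' ∧ pvOkE S' := by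
  have key : ∀ (remap : PySem.Dict Int Int),
      (∀ u, pvOk u → ∃ v, remap.get? u = some v ∧ pvOk v) →
      ∀ T, pvOkE T → ∃ T', pvRemapEdges remap T = some T' ∧ pvOkE T' := by
    intro remap hremap T hT
    induction T with
    | nil => exact ⟨[], rfl, by intro p hp; cases hp⟩
    | cons p rest ih =>
      obtain ⟨hu, hv⟩ := hT p (by simp)
      obtain ⟨u', hu', hou⟩ := hremap p.1 hu
      obtain ⟨v', hv', hov⟩ := hremap p.2 hv
      obtain ⟨T', hT', hoT⟩ := ih (fun q hq => hT q (by simp [hq]))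
      refine ⟨(u', v') :: T', ?_, ?_⟩
      · cases p with
        | mk a b =>
          rw [pvRemapEdges]
          simp only at hu' hv'
          rw [hu', hv', hT']
          rfl
      · intro q hq
        rcases List.mem_cons.1 hq with hq | hq
        · subst hq; exact ⟨hou, hov⟩
        · exact hoT q hq
  have okE_ofList : ∀ (l : List (Int × Int)), pvOkE l → pvOkE (PySem.Set.ofList l) := by
    intro l hl q hq
    exact hl q ((PySem.Set.mem_ofList _ _).1 hq)
  rcases hk with h | h | h <;> subst h
  · obtain ⟨T', hT', hoT⟩ := key (((PySem.Dict.empty.insert (0:Int) (0:Int))).insert 1 2 |>.insert 2 1)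
      (by intro u hu; rcases hu with h | h | h <;> subst h
          · exact ⟨0, by decide, Or.inl rfl⟩
          · exact ⟨2, by decide, Or.inr (Or.inr rfl)⟩
          · exact ⟨1, by decide, Or.inr (Or.inl rfl)⟩) S hS
    refine ⟨PySem.Set.ofList T', ?_, okE_ofList T' hoT⟩
    unfold pvReflect
    have hf : (PySem.List.pyRange 0 3 1).filter (fun x => x ≠ (0:Int)) = [1, 2] := by decide
    rw [hf]
    simp only []
    rw [hT']
    rfl
  · obtain ⟨T', hT', hoT⟩ := key (((PySem.Dict.empty.insert (1:Int) (1:Int))).insert 0 2 |>.insert 2 0)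
      (by intro u hu; rcases hu with h | h | h <;> subst h
          · exact ⟨2, by decide, Or.inr (Or.inr rfl)⟩
          · exact ⟨1, by decide, Or.inr (Or.inl rfl)⟩
          · exact ⟨0, by decide, Or.inl rfl⟩) S hS
    refine ⟨PySem.Set.ofList T', ?_, okE_ofList T' hoT⟩
    unfold pvReflect
    have hf : (PySem.List.pyRange 0 3 1).filter (fun x => x ≠ (1:Int)) = [0, 2] := by decide
    rw [hf]
    simp only []
    rw [hT']
    rfl
  · obtain ⟨T', hT', hoT⟩ := key (((PySem.Dict.empty.insert (2:Int) (2:Int))).insert 0 1 |>.insert 1 0)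
      (by intro u hu; rcases hu with h | h | h <;> subst h
          · exact ⟨1, by decide, Or.inr (Or.inl rfl)⟩
          · exact ⟨0, by decide, Or.inl rfl⟩
          · exact ⟨2, by decide, Or.inr (Or.inr rfl)⟩) S hS
    refine ⟨PySem.Set.ofList T', ?_, okE_ofList T' hoT⟩
    unfold pvReflect
    have hf : (PySem.List.pyRange 0 3 1).filter (fun x => x ≠ (2:Int)) = [0, 1] := by decide
    rw [hf]
    simp only []
    rw [hT']
    rfl

-- A's recursion computes pvTree on inputs where no KeyError can occur
theorem pvGoA_good (B : List (Int × Int)) (fuel : Nat) :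
    (∀ S refl, pvOkE S → pvOkR refl → (refl.length ≤ fuel ∨ refl.length ≤ 1) →
      pvGoA fuel S B refl = some (pvTree B S refl)) ∧
    (∀ ks S refl, pvOkE S → pvOkR refl → (∀ k ∈ ks, k ∈ refl) → refl.length ≤ fuel + 1 →
      pvLoopA fuel S B refl ks =
        some (ks.any (fun k => pvTree B ((pvReflect S k).getD []) (refl.filter (fun r => r ≠ k))))) := by
  induction fuel with
  | zero =>
    have hGA : ∀ S refl, pvOkE S → pvOkR refl → (refl.length ≤ 0 ∨ refl.length ≤ 1) →
        pvGoA 0 S B refl = some (pvTree B S refl) := by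
      intro S refl hS hR hlen
      have hlen1 : ¬ (refl.length > 1) := by omega
      rw [pvGoA, pvTree_eq]
      by_cases heq : PySem.Set.equal S B <;> simp [heq, hlen1]
    refine ⟨hGA, ?_⟩
    intro ks
    induction ks with
    | nil => intro S refl _ _ _ _; rw [pvLoopA]; rfl
    | cons k ks ih =>
      intro S refl hS hR hsub hlen
      obtain ⟨S', hS', hoS'⟩ := pvReflect_good S k (hR k (hsub k (by simp))) hS
      have hfl : (refl.filter (fun r => r ≠ k)).length ≤ refl.length := List.length_filter_le _ _
      have hchild := hGA S' (refl.filter (fun r => r ≠ k)) hoS'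
        (fun r hr => hR r (List.mem_of_mem_filter hr)) (by omega)
      rw [pvLoopA, hS']
      simp only []
      rw [hchild]
      cases htv : pvTree B S' (refl.filter (fun r => r ≠ k))
      · simp only [List.any_cons, hS', Option.getD_some, htv]
        rw [ih S refl hS hR (fun x hx => hsub x (by simp [hx])) hlen]
        simp
      · simp only [List.any_cons, hS', Option.getD_some, htv]
        simp
  | succ f ihf =>
    have hGA : ∀ S refl, pvOkE S → pvOkR refl → (refl.length ≤ f + 1 ∨ refl.length ≤ 1) →
        pvGoA (f + 1) S B refl = some (pvTree B S refl) := by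
      intro S refl hS hR hlen
      rw [pvGoA, pvTree_eq]
      by_cases heq : PySem.Set.equal S B
      · simp [heq]
      · by_cases h2 : refl.length > 1
        · have hrec := ihf.2 refl S refl hS hR (fun k hk => hk) (by omega)
          simp only [heq, Bool.false_eq_true, if_false, h2, if_true]
          rw [hrec]
          simp
        · simp [heq, h2]
    refine ⟨hGA, ?_⟩
    intro ks
    induction ks with
    | nil => intro S refl _ _ _ _; rw [pvLoopA]; rfl
    | cons k ks ih =>
      intro S refl hS hR hsub hlen
      obtain ⟨S', hS', hoS'⟩ := pvReflect_good S k (hR k (hsub k (by simp))) hS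
      have hfl : (refl.filter (fun r => r ≠ k)).length < refl.length :=
        List.length_filter_lt_length_iff_exists.mpr ⟨k, hsub k (by simp), by simp⟩
      have hchild := hGA S' (refl.filter (fun r => r ≠ k)) hoS'
        (fun r hr => hR r (List.mem_of_mem_filter hr)) (by omega)
      rw [pvLoopA, hS']
      simp only []
      rw [hchild]
      cases htv : pvTree B S' (refl.filter (fun r => r ≠ k))
      · simp only [List.any_cons, hS', Option.getD_some, htv]
        rw [ih S refl hS hR (fun x hx => hsub x (by simp [hx])) hlen]
        simp
      · simp only [List.any_cons, hS', Option.getD_some, htv]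
        simp

-- the children pushed for a good state: the reflected sets with the filtered lists
theorem pvPush_good (edges : List (Int × Int)) (rem : List Int) (hE : pvOkE edges) :
    ∀ ks, (∀ k ∈ ks, pvOk k) →
      pvPush edges rem ks =
        some (ks.map (fun k => ((pvReflect edges k).getD [], rem.filter (fun r => r ≠ k)))) ∧
      ∀ k ∈ ks, pvOkE ((pvReflect edges k).getD []) := by
  intro ks
  induction ks with
  | nil => exact fun _ => ⟨rfl, by simp⟩
  | cons k ks ih =>
    intro hks
    obtain ⟨S', hS', hoS'⟩ := pvReflect_good edges k (hks k (by simp)) hE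
    obtain ⟨hpush, hgood⟩ := ih (fun x hx => hks x (by simp [hx]))
    constructor
    · rw [pvPush, hS']
      simp only []
      rw [hpush]
      simp [hS']
    · intro x hx
      rcases List.mem_cons.1 hx with hx | hx
      · subst hx; rw [hS']; simpa using hoS'
      · exact hgood x hx

-- B's worklist computes the disjunction of pvTree over the stack, on good stacks
theorem pvLoopB_good (B : List (Int × Int)) :
    ∀ n stack, pvM stack ≤ n → (∀ e ∈ stack, pvOkE e.1 ∧ pvOkR e.2) →
      pvLoopB B stack = some (stack.any (fun e => pvTree B e.1 e.2)) := by
  intro n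
  induction n using Nat.strong_induction_on with
  | _ n ihn =>
    intro stack hM hgood
    rw [pvLoopB]
    cases hl : stack.getLast? with
    | none =>
      have : stack = [] := List.getLast?_eq_none_iff.1 hl
      subst this
      rfl
    | some e =>
      obtain ⟨edges, rem⟩ := e
      have hsplit := List.dropLast_append_getLast? _ hl
      have hmem : (edges, rem) ∈ stack := by
        rw [← hsplit]; simp
      have hMsplit : pvM stack = pvM stack.dropLast + pvN rem.length := by
        conv_lhs => rw [← hsplit]
        rw [pvM_append]; simp [pvM]
      have hgoodLast := hgood _ hmem
      have hgoodDrop : ∀ e ∈ stack.dropLast, pvOkE e.1 ∧ pvOkR e.2 :=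
        fun e he => hgood e (by rw [← hsplit]; exact List.mem_append_left _ he)
      have hany : stack.any (fun e => pvTree B e.1 e.2) =
          (stack.dropLast.any (fun e => pvTree B e.1 e.2) || pvTree B edges rem) := by
        conv_lhs => rw [← hsplit]
        simp
      by_cases heq : PySem.Set.equal edges B
      · have htrue : pvTree B edges rem = true := by
          rw [pvTree_eq, heq]; simp
        simp [heq, hany, htrue]
      · simp only [heq, Bool.false_eq_true, if_false]
        split
        · -- rem.length > 1 : push the children
          rename_i h2
          obtain ⟨hpush, hcgood⟩ := pvPush_good edges rem hgoodLast.1 rem (hgoodLast.2)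
          rw [hpush]
          simp only []
          have hcsgood : ∀ e ∈ stack.dropLast ++
              rem.map (fun k => ((pvReflect edges k).getD [], rem.filter (fun r => r ≠ k))),
              pvOkE e.1 ∧ pvOkR e.2 := by
            intro e he
            rcases List.mem_append.1 he with he | he
            · exact hgoodDrop e he
            · obtain ⟨k, hk, rfl⟩ := List.mem_map.1 he
              exact ⟨hcgood k hk, fun r hr => hgoodLast.2 r (List.mem_of_mem_filter hr)⟩
          have hlt : pvM (stack.dropLast ++
              rem.map (fun k => ((pvReflect edges k).getD [], rem.filter (fun r => r ≠ k)))) < pvM stack := by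
            rw [pvM_append]
            have := pvPush_M_lt edges rem _ hpush h2
            omega
          rw [ihn (n - 1) (by have := pvN_pos rem.length; omega) _ (by omega) hcsgood]
          congr 1
          rw [List.any_append, hany]
          congr 1
          have heqf : PySem.Set.equal edges B = false := Bool.eq_false_iff.mpr heq
          rw [pvTree_eq, heqf]
          simp only [h2, if_true, Bool.false_or]
          rw [List.any_map]
          rfl
        · -- rem.length ≤ 1 : drop the state
          rename_i h2
          have hlt : pvM stack.dropLast < pvM stack := by
            have := pvN_pos rem.length; omega
          rw [ihn (n - 1) (by have := pvN_pos rem.length; omega) _ (by omega) hgoodDrop]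
          have heqf : PySem.Set.equal edges B = false := Bool.eq_false_iff.mpr heq
          rw [hany, pvTree_eq, heqf]
          simp [h2]

-- the empty edge set: reflect is total and every node carries the same (empty) set
theorem pvGoA_nilS (B : List (Int × Int)) (hB : PySem.Set.equal ([] : List (Int × Int)) B = false)
    (fuel : Nat) :
    (∀ refl, pvGoA fuel [] B refl = some false) ∧
    (∀ refl ks, pvLoopA fuel [] B refl ks = some false) := by
  induction fuel with
  | zero =>
    have hGA : ∀ refl, pvGoA 0 [] B refl = some false := by
      intro refl; rw [pvGoA]; simp [hB]
    refine ⟨hGA, ?_⟩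
    intro refl ks
    induction ks with
    | nil => rw [pvLoopA]
    | cons k ks ih =>
      rw [pvLoopA, pvReflect_nil]
      simp only []
      simp [hGA, ih]
  | succ f ihf =>
    have hGA : ∀ refl, pvGoA (f + 1) [] B refl = some false := by
      intro refl
      rw [pvGoA]
      simp only [hB, Bool.false_eq_true, if_false]
      split
      · exact ihf.2 refl refl
      · rfl
    refine ⟨hGA, ?_⟩
    intro refl ks
    induction ks with
    | nil => rw [pvLoopA]
    | cons k ks ih =>
      rw [pvLoopA, pvReflect_nil]
      simp only []
      simp [hGA, ih]

theorem pvPush_nilS (rem : List Int) :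
    ∀ ks, pvPush [] rem ks = some (ks.map (fun k => ([], rem.filter (fun r => r ≠ k)))) := by
  intro ks
  induction ks with
  | nil => rfl
  | cons k ks ih =>
    rw [pvPush, pvReflect_nil]
    simp only []
    rw [ih]
    rfl

theorem pvLoopB_nilS (B : List (Int × Int)) (hB : PySem.Set.equal ([] : List (Int × Int)) B = false) :
    ∀ n stack, pvM stack ≤ n → (∀ e ∈ stack, e.1 = []) → pvLoopB B stack = some false := by
  intro n
  induction n using Nat.strong_induction_on with
  | _ n ihn =>
    intro stack hM hnil
    rw [pvLoopB]
    cases hl : stack.getLast? with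
    | none => rfl
    | some e =>
      obtain ⟨edges, rem⟩ := e
      have hsplit := List.dropLast_append_getLast? _ hl
      have hmem : (edges, rem) ∈ stack := by rw [← hsplit]; simp
      have hE : edges = [] := hnil _ hmem
      subst hE
      have hMsplit : pvM stack = pvM stack.dropLast + pvN rem.length := by
        conv_lhs => rw [← hsplit]
        rw [pvM_append]; simp [pvM]
      have hnilDrop : ∀ e ∈ stack.dropLast, e.1 = [] :=
        fun e he => hnil e (by rw [← hsplit]; exact List.mem_append_left _ he)
      simp only [hB, Bool.false_eq_true, if_false]
      split
      · rename_i h2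
        rw [pvPush_nilS]
        simp only []
        have hlt : pvM (stack.dropLast ++ rem.map (fun k => ([], rem.filter (fun r => r ≠ k)))) < pvM stack := by
          rw [pvM_append]
          have := pvPush_M_lt [] rem _ (pvPush_nilS rem rem) h2
          omega
        exact ihn (n - 1) (by have := pvN_pos rem.length; omega) _ (by omega)
          (by intro e he
              rcases List.mem_append.1 he with he | he
              · exact hnilDrop e he
              · obtain ⟨k, hk, rfl⟩ := List.mem_map.1 he; rfl)
      · have hlt : pvM stack.dropLast < pvM stack := by
          have := pvN_pos rem.length; omega
        exact ihn (n - 1) (by have := pvN_pos rem.length; omega) _ (by omega) hnilDrop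

-- ===== VERDICT (by name: the statement is the Claim_ definition above) =====
theorem match_edges_spec : Claim_equal_match_edges := by
  intro A B reflections _ hpre
  unfold Spec_match_edges match_edges match_edges_alt
  by_cases heq : PySem.Set.equal A B
  · -- both sides return True at the root
    rw [pvGoA.eq_def, pvLoopB]
    simp [heq]
  · have heq' : PySem.Set.equal A B = false := Bool.eq_false_iff.mpr heq
    rcases hpre with h | h | h | h
    · rw [h] at heq'; cases heq'
    · -- len(reflections) ≤ 1: no recursion, both return False
      have h1 : ¬ (reflections.length > 1) := by omega
      rw [pvGoA.eq_def]
      simp only [heq', Bool.false_eq_true, if_false]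
      rw [pvLoopB]
      simp only [List.getLast?_singleton, heq', Bool.false_eq_true, if_false]
      rw [dif_neg h1]
      simp only [List.dropLast_singleton]
      rw [pvLoopB]
      simp only [List.getLast?_nil]
      cases hlen : reflections.length with
      | zero => simp
      | succ n =>
        have hn : n = 0 := by omega
        subst hn
        simp
    · -- A is the empty set: reflect never raises and every node repeats the same test
      subst h
      rw [(pvGoA_nilS B heq' reflections.length).1 reflections]
      rw [pvLoopB_nilS B heq' (pvM [([], reflections)]) [([], reflections)] le_rfl (by simp)]
    · -- reflections ⊆ {0,1,2} and all endpoints in {0,1,2}: no KeyError anywhere,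
      -- both sides compute pvTree over the same tree
      have hE : pvOkE A := fun p hp => h.2 p hp
      have hR : pvOkR reflections := fun r hr => h.1 r hr
      rw [(pvGoA_good B reflections.length).1 A reflections hE hR (Or.inl le_rfl)]
      rw [pvLoopB_good B (pvM [(A, reflections)]) [(A, reflections)] le_rfl
        (by intro e he; simp at he; subst he; exact ⟨hE, hR⟩)]
      simp
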